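-- pv_equiv track=rewrite | github.com/clarkngo/rag-mlops | modelserver-fastapi/main.py | process_movies
-- ===== SOURCE A (Python) =====
-- def process_movies(movies_data):
--     genre_names = [
--         'Action', 'Adventure', 'Animation', 'Biography', 'Comedy', 'Crime',
--         'Documentary', 'Drama', 'Family', 'Fantasy', 'FilmNoir', 'History',
--         'Horror', 'Music', 'Musical', 'Mystery', 'Romance', 'SciFi', 'Short',
--         'Sport', 'Thriller', 'War', 'Western'
--     ]
--
--     processed_data = []
--     genre_vector = {genre: 0 for genre in genre_names}
--     for movie in movies_data:
--         for genre in movie['genres']: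
--             if genre in genre_vector:
--                 genre_vector[genre] = 1
--
--     return genre_vector
-- ===== SOURCE B (Python) =====
-- def process_movies(movies_data):
--     genre_names = [
--         'Action', 'Adventure', 'Animation', 'Biography', 'Comedy', 'Crime',
--         'Documentary', 'Drama', 'Family', 'Fantasy', 'FilmNoir', 'History',
--         'Horror', 'Music', 'Musical', 'Mystery', 'Romance', 'SciFi', 'Short',
--         'Sport', 'Thriller', 'War', 'Western'
--     ]
--     # genre-major: for each fixed genre, scan the movies asking whether it occurs anywhere
--     return {genre: (1 if any(genre in movie['genres'] for movie in movies_data) else 0)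
--             for genre in genre_names}
-- ===== Notes on version B (the rewrite author's own statement) =====
-- stated objective: alternative
-- what changed: B inverts the loop nesting: instead of A's movie-major pass that mutates per-genre flags in a dict, B iterates over the fixed 23-genre list and for each genre scans the movies with any(), building the result directly with no mutable vector.
import Mathlib
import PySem

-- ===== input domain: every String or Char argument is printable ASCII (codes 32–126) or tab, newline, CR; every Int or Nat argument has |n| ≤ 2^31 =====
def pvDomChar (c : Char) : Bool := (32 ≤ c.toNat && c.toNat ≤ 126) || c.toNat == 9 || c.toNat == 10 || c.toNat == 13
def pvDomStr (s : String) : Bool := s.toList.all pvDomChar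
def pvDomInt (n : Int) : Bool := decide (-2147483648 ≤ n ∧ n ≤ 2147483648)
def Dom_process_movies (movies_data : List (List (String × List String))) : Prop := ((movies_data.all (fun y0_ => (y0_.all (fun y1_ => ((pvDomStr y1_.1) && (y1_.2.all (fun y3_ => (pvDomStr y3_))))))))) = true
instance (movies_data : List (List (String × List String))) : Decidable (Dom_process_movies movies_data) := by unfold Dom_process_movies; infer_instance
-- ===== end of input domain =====

-- B inverts the loop nesting: a genre-major scan (for each fixed genre, does any movie carry it?)
-- instead of A's movie-major pass mutating per-genre flags (alternative; similar cost).

-- the fixed genre_names literal shared by both Pythons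
def pvGenreNames : List String :=
  ["Action", "Adventure", "Animation", "Biography", "Comedy", "Crime",
   "Documentary", "Drama", "Family", "Fantasy", "FilmNoir", "History",
   "Horror", "Music", "Musical", "Mystery", "Romance", "SciFi", "Short",
   "Sport", "Thriller", "War", "Western"]

-- movie['genres']; Pre_ excludes the KeyError (get? = none) case, so getD [] is exact there
def pvGenresOf (movie : List (String × List String)) : List String :=
  ((PySem.Dict.mk movie).get? "genres").getD []

-- ===== PORT A =====
def process_movies (movies_data : List (List (String × List String))) : List (String × Int) :=
  -- genre_vector = {genre: 0 for genre in genre_names}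
  let genre_vector : PySem.Dict String Int :=
    pvGenreNames.foldl (fun d g => d.insert g 0) PySem.Dict.empty
  -- for movie in movies_data: for genre in movie['genres']: if genre in genre_vector: genre_vector[genre] = 1
  let gv := movies_data.foldl (fun gv movie =>
      (pvGenresOf movie).foldl
        (fun gv genre => if gv.contains genre then gv.insert genre 1 else gv) gv)
    genre_vector
  gv.items

-- ===== PORT B =====
def process_movies_alt (movies_data : List (List (String × List String))) : List (String × Int) :=
  -- {genre: 1 if any(genre in movie['genres'] for movie in movies_data) else 0 for genre in genre_names}
  -- (genre_names has no duplicate keys, so the dict comprehension is exactly this map)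
  pvGenreNames.map (fun g =>
    (g, if movies_data.any (fun movie => (pvGenresOf movie).contains g) then (1 : Int) else 0))

-- ===== PRECONDITION & SPEC =====
-- Pre_ excludes exactly the movies with no 'genres' key, on which Python A raises KeyError
def Pre_process_movies (movies_data : List (List (String × List String))) : Prop :=
  ∀ movie ∈ movies_data, "genres" ∈ movie.map Prod.fst
instance (movies_data : List (List (String × List String))) : Decidable (Pre_process_movies movies_data) := by unfold Pre_process_movies; infer_instance
def pvWitness_process_movies : (List (List (String × List String))) :=
  [[("genres", ["Action", "Noir"])], [("genres", ["Drama"]), ("title", ["x"])]]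
def Spec_process_movies (movies_data : List (List (String × List String))) (out : List (String × Int)) : Prop := out = process_movies_alt movies_data
instance (movies_data : List (List (String × List String))) (out : List (String × Int)) : Decidable (Spec_process_movies movies_data out) := by unfold Spec_process_movies; infer_instance

-- ===== CLAIM (what is proved, stated in full; the proofs are below) =====
def Claim_equal_process_movies : Prop := ∀ (movies_data : List (List (String × List String))), Dom_process_movies movies_data → Pre_process_movies movies_data → Spec_process_movies movies_data (process_movies movies_data)

-- ===== LEMMAS AND PROOFS =====

-- the nested per-movie/per-genre fold is the fold over the flattened genre stream
theorem pv_foldl_nested (md : List (List (String × List String)))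
    (f : PySem.Dict String Int → String → PySem.Dict String Int) (d : PySem.Dict String Int) :
    md.foldl (fun gv movie => (pvGenresOf movie).foldl f gv) d
      = (md.flatMap (fun movie => pvGenresOf movie)).foldl f d := by
  induction md generalizing d with
  | nil => rfl
  | cons m rest ih => simp [List.flatMap_cons, List.foldl_append, ih]

-- one conditional-flag step rewrites every matching entry (and only those) to 1
theorem pv_step_items (d : PySem.Dict String Int) (g : String) :
    (if d.contains g then d.insert g 1 else d).items
      = d.items.map (fun p => if p.1 = g then (p.1, (1 : Int)) else p) := by
  by_cases h : d.contains g = true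
  · rw [if_pos h]
    simp only [PySem.Dict.insert, h, if_true]
    apply List.map_congr_left
    intro p _
    by_cases hp : p.1 = g
    · simp [hp]
    · simp [hp, beq_iff_eq]
  · rw [if_neg h]
    conv_lhs => rw [← List.map_id d.items]
    apply List.map_congr_left
    intro p hp
    have hpg : ¬ p.1 = g := by
      intro e
      exact h (show d.items.any (fun q => q.1 == g) = true from
        List.any_eq_true.mpr ⟨p, hp, by simp [e]⟩)
    simp [hpg]

-- the whole flag loop, characterised entrywise: an entry becomes 1 iff its key occurs in the stream
theorem pv_mark_items (gs : List String) (d : PySem.Dict String Int) :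
    (gs.foldl (fun gv genre => if gv.contains genre then gv.insert genre 1 else gv) d).items
      = d.items.map (fun p => if p.1 ∈ gs then (p.1, (1 : Int)) else p) := by
  induction gs generalizing d with
  | nil => simp
  | cons g rest ih =>
    simp only [List.foldl_cons, ih, pv_step_items, List.map_map]
    apply List.map_congr_left
    intro p _
    by_cases hp : p.1 = g
    · simp [hp]
    · by_cases hr : p.1 ∈ rest <;> simp [hp, hr]

-- the initial all-zero dict, computed once
theorem pv_init_items :
    (pvGenreNames.foldl (fun d g => d.insert g 0) (PySem.Dict.empty : PySem.Dict String Int)).items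
      = pvGenreNames.map (fun g => (g, (0 : Int))) := by decide

-- ===== VERDICT (by name: the statement is the Claim_ definition above) =====
theorem process_movies_spec : Claim_equal_process_movies := by
  intro md _ _
  unfold Spec_process_movies process_movies process_movies_alt
  dsimp only
  rw [pv_foldl_nested, pv_mark_items, pv_init_items, List.map_map]
  apply List.map_congr_left
  intro g _
  simp only [Function.comp_apply]
  have hc : (md.any (fun movie => (pvGenresOf movie).contains g) = true)
      ↔ g ∈ md.flatMap (fun movie => pvGenresOf movie) := by
    simp [List.any_eq_true, List.mem_flatMap]
  by_cases hg : g ∈ md.flatMap (fun movie => pvGenresOf movie)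
  · rw [if_pos hg, if_pos (hc.mpr hg)]
  · rw [if_neg hg, if_neg (fun h => hg (hc.mp h))]
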